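-- pv_equiv track=rewrite | github.com/TheReverseWasp/TBD-Boolean-IR_Model | Aplicacion/complementos.py | join_dics_to_list
-- ===== SOURCE A (Python) =====
-- def join_dics_to_list(dic1, dic2):
--     dic_general = {}
--     for k, v in dic1.items():
--         dic_general[k] = v
--     for k, v in dic2.items():
--         dic_general[k] = v
--     answer = []
--     for k, v in dic_general.items():
--         answer.append(k)
--     return answer
-- ===== SOURCE B (Python) =====
-- def join_dics_to_list(dic1, dic2):
--     return list(dic1) + [k for k in dic2 if k not in dic1]
-- ===== Notes on version B (the rewrite author's own statement) =====
-- stated objective: idiomatic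
-- what changed: B builds no intermediate merged dict: it takes dic1's keys directly and appends, via a comprehension, only the keys of dic2 not already in dic1, preserving the same first-seen order.
import Mathlib
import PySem

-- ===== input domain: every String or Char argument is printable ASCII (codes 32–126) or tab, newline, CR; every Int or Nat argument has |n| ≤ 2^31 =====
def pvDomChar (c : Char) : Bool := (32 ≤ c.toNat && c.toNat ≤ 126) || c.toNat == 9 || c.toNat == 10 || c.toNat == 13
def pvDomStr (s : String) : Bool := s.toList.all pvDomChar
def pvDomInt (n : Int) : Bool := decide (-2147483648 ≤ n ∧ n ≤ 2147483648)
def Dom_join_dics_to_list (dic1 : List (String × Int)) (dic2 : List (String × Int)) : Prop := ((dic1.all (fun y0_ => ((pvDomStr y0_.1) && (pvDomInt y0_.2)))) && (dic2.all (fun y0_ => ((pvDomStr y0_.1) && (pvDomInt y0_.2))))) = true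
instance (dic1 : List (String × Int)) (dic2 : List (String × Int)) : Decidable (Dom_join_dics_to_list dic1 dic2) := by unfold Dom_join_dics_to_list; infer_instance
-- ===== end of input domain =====

-- B is idiomatic: no intermediate merged dict — dic1's keys followed by the keys of dic2 not in dic1.

-- ===== PORT A =====
def join_dics_to_list (dic1 : List (String × Int)) (dic2 : List (String × Int)) : List String :=
  let dic_general : PySem.Dict String Int := PySem.Dict.empty
  let dic_general := dic1.foldl (fun d p => d.insert p.1 p.2) dic_general
  let dic_general := dic2.foldl (fun d p => d.insert p.1 p.2) dic_general
  let answer : List String := []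
  let answer := dic_general.items.foldl (fun a p => a ++ [p.1]) answer
  answer

-- ===== PORT B =====
def join_dics_to_list_alt (dic1 : List (String × Int)) (dic2 : List (String × Int)) : List String :=
  -- list(dic1): the dict's keys, i.e. first occurrences of the key list
  PySem.List.dedup (dic1.map (·.1)) ++
    -- [k for k in dic2 if k not in dic1]
    (PySem.List.dedup (dic2.map (·.1))).filter (fun k => !((dic1.map (·.1)).contains k))

-- ===== PRECONDITION & SPEC =====
def Spec_join_dics_to_list (dic1 : List (String × Int)) (dic2 : List (String × Int)) (out : List String) : Prop := out = join_dics_to_list_alt dic1 dic2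
instance (dic1 : List (String × Int)) (dic2 : List (String × Int)) (out : List String) : Decidable (Spec_join_dics_to_list dic1 dic2 out) := by unfold Spec_join_dics_to_list; infer_instance

-- ===== CLAIM (what is proved, stated in full; the proofs are below) =====
def Claim_equal_join_dics_to_list : Prop := ∀ (dic1 : List (String × Int)) (dic2 : List (String × Int)), Dom_join_dics_to_list dic1 dic2 → Spec_join_dics_to_list dic1 dic2 (join_dics_to_list dic1 dic2)

-- ===== LEMMAS AND PROOFS =====

-- the answer-building loop of A collects the first components of the items
theorem foldl_append_fst {α β : Type} (l : List (α × β)) (acc : List α) :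
    l.foldl (fun a p => a ++ [p.1]) acc = acc ++ l.map Prod.fst := by
  induction l generalizing acc with
  | nil => simp
  | cons x tl ih => simp [List.foldl_cons, ih]

-- folding Set.add over l from s appends exactly the deduped elements of l not in s
theorem foldl_add_eq (l : List String) (s : List String) :
    l.foldl PySem.Set.add s
      = s ++ (l.foldl PySem.Set.add []).filter (fun k => !(s.contains k)) := by
  induction l generalizing s with
  | nil => simp
  | cons x tl ih =>
    have hx : (x :: tl).foldl PySem.Set.add []
        = [x] ++ (tl.foldl PySem.Set.add []).filter (fun k => !(([x] : List String).contains k)) := by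
      rw [List.foldl_cons]
      have h0 : PySem.Set.add ([] : List String) x = [x] := rfl
      rw [h0]
      exact ih [x]
    rw [List.foldl_cons, ih (PySem.Set.add s x), hx]
    by_cases hsx : x ∈ s
    · have hadd : PySem.Set.add s x = s := by simp [PySem.Set.add, hsx]
      rw [hadd]
      have hcx : (!s.contains x) = false := by simp [hsx]
      simp only [List.filter_append, List.filter_cons, hcx, Bool.false_eq_true, if_false,
        List.filter_nil, List.nil_append, List.filter_filter]
      congr 1
      apply List.filter_congr
      intro k _
      by_cases hkx : k = x
      · subst hkx; simp [hsx]
      · simp [hkx]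
    · have hadd : PySem.Set.add s x = s ++ [x] := by simp [PySem.Set.add, hsx]
      rw [hadd]
      have hcx : (!s.contains x) = true := by simp [hsx]
      simp only [List.filter_cons, hcx, if_true,
        List.filter_filter, List.append_assoc, List.singleton_append]
      congr 1
      congr 1
      apply List.filter_congr
      intro k _
      by_cases hkx : k = x
      · subst hkx; simp
      · simp [hkx, Bool.and_comm]

theorem join_dics_to_list_spec : Claim_equal_join_dics_to_list := by
  intro dic1 dic2 _
  unfold Spec_join_dics_to_list join_dics_to_list join_dics_to_list_alt
  simp only [foldl_append_fst, List.nil_append]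
  have hkeys : ∀ d : PySem.Dict String Int, List.map Prod.fst d.items = d.keys := fun _ => rfl
  rw [hkeys,
      PySem.Dict.keys_foldl_insert_key (key := Prod.fst) (f := fun _ p => p.2),
      PySem.Dict.keys_foldl_insert_key (key := Prod.fst) (f := fun _ p => p.2)]
  show PySem.Set.update (PySem.Set.update (PySem.Dict.empty : PySem.Dict String Int).keys
        (dic1.map Prod.fst)) (dic2.map Prod.fst) = _
  have hempty : (PySem.Dict.empty : PySem.Dict String Int).keys = [] := rfl
  rw [hempty]
  show (dic2.map Prod.fst).foldl PySem.Set.add ((dic1.map Prod.fst).foldl PySem.Set.add []) = _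
  rw [foldl_add_eq]
  have hded : ∀ l : List String, PySem.List.dedup l = l.foldl PySem.Set.add [] := fun _ => rfl
  simp only [← hded]
  congr 1
  apply List.filter_congr
  intro k _
  -- membership in the deduped key list equals membership in the raw key list
  simp

-- ===== VERDICT (by name: the statement is the Claim_ definition above) =====
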